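-- pv_equiv track=rewrite | github.com/Rayyandl/ChefGPT | GreedySearchSetsTestV2.py | get_candidate_recipe_ids
-- ===== SOURCE A (Python) =====
-- from collections import defaultdict, Counter
-- from typing import Iterable, Dict, Set, Tuple, List
--
-- def get_candidate_recipe_ids(
--     user_set: Set[str],
--     inv_index: Dict[str, Set[int]],
--     max_candidates: int = 5000
-- ) -> Set[int]:
--     """
--     Use the inverted index to get recipes that share at least one user ingredient.
--     Keep the top-N with most overlaps to limit scoring work.
--     """
--     counts = Counter()
--     for ing in user_set:
--         for rid in inv_index.get(ing, []):
--             counts[rid] += 1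
--     if not counts:
--         return set()
--     return {rid for rid, _ in counts.most_common(max_candidates)}
-- ===== SOURCE B (Python) =====
-- def get_candidate_recipe_ids(
--     user_set,
--     inv_index,
--     max_candidates=5000,
-- ):
--     """Count overlaps into a plain dict, then bucket ids by count and walk the
--     distinct counts from highest to lowest until max_candidates ids are taken."""
--     if max_candidates <= 0:
--         return set()
--     counts = {}
--     for ing in user_set:
--         for rid in inv_index.get(ing, []):
--             counts[rid] = counts.get(rid, 0) + 1
--     buckets = {}
--     for rid, c in counts.items():
--         buckets.setdefault(c, []).append(rid)
--     result = []
--     for c in sorted(buckets, reverse=True):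
--         if len(result) >= max_candidates:
--             break
--         result.extend(buckets[c])
--     return set(result[:max_candidates])
-- ===== Notes on version B (the rewrite author's own statement) =====
-- stated objective: alternative
-- what changed: Replaces Counter.most_common (stable sort of all (id,count) items and a slice) by a count-indexed bucket dict: ids are grouped by their overlap count, the distinct counts are walked from highest to lowest, and the walk stops as soon as max_candidates ids are collected; max_candidates <= 0 is short-circuited to set().
-- outside the precondition, e.g. on get_candidate_recipe_ids({'a'}, {'a': {1, 2}}, 1): A returns {1}, B returns {1}
import Mathlib
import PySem

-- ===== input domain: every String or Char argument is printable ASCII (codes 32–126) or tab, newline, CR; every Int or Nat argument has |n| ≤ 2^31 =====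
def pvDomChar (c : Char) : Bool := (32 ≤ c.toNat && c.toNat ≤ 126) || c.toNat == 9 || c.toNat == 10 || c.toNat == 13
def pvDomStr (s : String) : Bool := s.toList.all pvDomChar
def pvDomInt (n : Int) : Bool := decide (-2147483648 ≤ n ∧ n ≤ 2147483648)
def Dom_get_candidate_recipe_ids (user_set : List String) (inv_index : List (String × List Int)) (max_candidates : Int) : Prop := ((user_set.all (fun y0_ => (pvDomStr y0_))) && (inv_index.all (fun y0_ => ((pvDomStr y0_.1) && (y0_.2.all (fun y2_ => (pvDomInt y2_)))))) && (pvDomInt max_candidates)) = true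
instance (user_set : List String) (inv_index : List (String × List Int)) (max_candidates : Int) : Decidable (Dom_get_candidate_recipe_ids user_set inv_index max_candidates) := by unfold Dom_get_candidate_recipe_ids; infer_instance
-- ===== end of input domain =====

-- B replaces Counter.most_common (stable sort of all items + slice) by a count→ids bucket
-- dict walked from the highest count downwards, stopping once max_candidates ids are taken
-- (objective: alternative decomposition; equal value proved on Pre_).

-- ===== PORT A =====
-- inv_index.get(ing, []) on the association list (first match, as a Python dict has unique keys)
def pvGetIngD (inv_index : List (String × List Int)) (k : String) : List Int :=
  (((inv_index.find? (fun p => p.1 == k)).map (fun p => p.2)).getD [])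

-- Counter.most_common(n): [] for n ≤ 0 (heapq.nlargest), else the first n items of the
-- stable sort by count descending (nlargest is documented equivalent to sorted(...)[:n])
def pvMostCommon (items : List (Int × Int)) (n : Int) : List (Int × Int) :=
  if n ≤ 0 then [] else (PySem.List.sorted items (fun kv => kv.2) true).take n.toNat

def get_candidate_recipe_ids (user_set : List String) (inv_index : List (String × List Int)) (max_candidates : Int) : List Int :=
  let counts : PySem.Dict Int Int :=
    user_set.foldl (fun d ing =>
      (pvGetIngD inv_index ing).foldl (fun d rid => d.modify rid 0 (fun v => v + 1)) d)
      PySem.Dict.empty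
  if counts.items.isEmpty then []
  else PySem.Set.ofList ((pvMostCommon counts.items max_candidates).map (fun kv => kv.1))

-- ===== PORT B =====
-- for c in sorted(buckets, reverse=True): if len(result) >= max_candidates: break; result.extend(buckets[c])
def pvWalk (buckets : PySem.Dict Int (List Int)) (n : Int) : List Int → List Int → List Int
  | [], result => result
  | c :: rest, result =>
      if n ≤ (result.length : Int) then result
      else pvWalk buckets n rest (result ++ buckets.getD c [])

def get_candidate_recipe_ids_alt (user_set : List String) (inv_index : List (String × List Int)) (max_candidates : Int) : List Int :=
  if max_candidates ≤ 0 then []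
  else
    let counts : PySem.Dict Int Int :=
      user_set.foldl (fun d ing =>
        (pvGetIngD inv_index ing).foldl (fun d rid => d.insert rid (d.getD rid 0 + 1)) d)
        PySem.Dict.empty
    let buckets : PySem.Dict Int (List Int) :=
      counts.items.foldl (fun d p => d.modify p.2 [] (fun l => l ++ [p.1])) PySem.Dict.empty
    let result := pvWalk buckets max_candidates (PySem.List.sorted buckets.keys (fun c => c) true) []
    PySem.Set.ofList (PySem.List.slice result none (some max_candidates))

-- ===== PRECONDITION & SPEC =====
-- Pre_ excludes (a) list arguments that are not valid set/dict representations (a duplicated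
-- ingredient, recipe id or dict key — the Python arguments are sets and a dict, which cannot
-- hold duplicates), and (b) inputs where the max_candidates cutoff falls strictly inside a
-- group of equal overlap counts: there WHICH tied ids survive depends on Python's set/dict
-- hash iteration order, an accident no deterministic port can pin down (both defensible).
def Pre_get_candidate_recipe_ids (user_set : List String) (inv_index : List (String × List Int)) (max_candidates : Int) : Prop :=
  user_set.Nodup ∧ (inv_index.map (fun p => p.1)).Nodup ∧ (∀ p ∈ inv_index, p.2.Nodup) ∧
  (max_candidates ≤ 0 ∨
    (let occ := user_set.flatMap (fun ing => pvGetIngD inv_index ing);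
     let L := PySem.List.sorted ((PySem.Set.ofList occ).map (fun r => (occ.count r : Int)))
                (fun c => c) true;
     (L.length : Int) ≤ max_candidates ∨
       L.getD (max_candidates.toNat - 1) 0 ≠ L.getD max_candidates.toNat 0))

instance (user_set : List String) (inv_index : List (String × List Int)) (max_candidates : Int) : Decidable (Pre_get_candidate_recipe_ids user_set inv_index max_candidates) := by unfold Pre_get_candidate_recipe_ids; infer_instance

def pvWitness_get_candidate_recipe_ids : List String × (List (String × List Int)) × Int :=
  (["egg", "milk"], [("egg", [1, 2]), ("milk", [2])], 1)

def Spec_get_candidate_recipe_ids (user_set : List String) (inv_index : List (String × List Int)) (max_candidates : Int) (out : List Int) : Prop := out = get_candidate_recipe_ids_alt user_set inv_index max_candidates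
instance (user_set : List String) (inv_index : List (String × List Int)) (max_candidates : Int) (out : List Int) : Decidable (Spec_get_candidate_recipe_ids user_set inv_index max_candidates out) := by unfold Spec_get_candidate_recipe_ids; infer_instance

-- ===== CLAIM (what is proved, stated in full; the proofs are below) =====
def Claim_equal_get_candidate_recipe_ids : Prop := ∀ (user_set : List String) (inv_index : List (String × List Int)) (max_candidates : Int), Dom_get_candidate_recipe_ids user_set inv_index max_candidates → Pre_get_candidate_recipe_ids user_set inv_index max_candidates → Spec_get_candidate_recipe_ids user_set inv_index max_candidates (get_candidate_recipe_ids user_set inv_index max_candidates)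

-- ===== LEMMAS AND PROOFS =====

theorem pv_insertBy_cons {α : Type} (bef : α → α → Bool) (x y : α) (ys : List α) :
    PySem.List.insertBy bef x (y :: ys)
      = if bef x y then x :: y :: ys else y :: PySem.List.insertBy bef x ys := rfl

-- insertBy passes over a block none of whose elements x goes before
theorem pv_insertBy_append (bef : (Int × Int) → (Int × Int) → Bool) (x : Int × Int)
    (ys zs : List (Int × Int)) (h : ∀ y ∈ ys, bef x y = false) :
    PySem.List.insertBy bef x (ys ++ zs) = ys ++ PySem.List.insertBy bef x zs := by
  induction ys with
  | nil => simp
  | cons y ys ih =>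
      rw [List.cons_append, pv_insertBy_cons, h y (by simp), ih (fun y hy => h y (by simp [hy]))]
      simp

-- insertBy puts x in front of a block all of whose elements x goes before
theorem pv_insertBy_front (bef : (Int × Int) → (Int × Int) → Bool) (x : Int × Int)
    (zs : List (Int × Int)) (h : ∀ y ∈ zs, bef x y = true) :
    PySem.List.insertBy bef x zs = x :: zs := by
  cases zs with
  | nil => rfl
  | cons z l => rw [pv_insertBy_cons, h z (by simp)]; simp

-- insertion into a flatten of strictly-descending buckets, key already present:
-- x lands at the end of its own bucket
theorem pv_insert_flat_mem (C : List Int) (B : Int → List (Int × Int)) (x : Int × Int)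
    (hP : C.Pairwise (fun a b => b < a))
    (hB : ∀ c' ∈ C, ∀ p ∈ B c', p.2 = c')
    (hc : x.2 ∈ C) :
    PySem.List.insertBy (fun a b => decide (b.2 < a.2)) x (C.flatMap B)
      = C.flatMap (fun c' => B c' ++ if x.2 == c' then [x] else []) := by
  induction C with
  | nil => simp at hc
  | cons c' rest ih =>
      rw [List.pairwise_cons] at hP
      obtain ⟨hgt, hPrest⟩ := hP
      by_cases hx : x.2 = c'
      · have hrest : ∀ c'' ∈ rest, (B c'' ++ if x.2 == c'' then [x] else []) = B c'' := by
          intro c'' hm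
          have : x.2 ≠ c'' := by have := hgt c'' hm; omega
          simp [this]
        rw [List.flatMap_cons, pv_insertBy_append _ _ _ _
            (by intro y hy; have := hB c' (by simp) y hy; simp [this, hx]),
          pv_insertBy_front _ _ _ (by
            intro y hy
            rw [List.mem_flatMap] at hy
            obtain ⟨c'', hm, hyB⟩ := hy
            have h1 := hB c'' (by simp [hm]) y hyB
            have h2 := hgt c'' hm
            simp [h1, hx]; omega),
          List.flatMap_cons, List.flatMap_congr hrest]
        simp [hx]
      · have hcr : x.2 ∈ rest := by
          rcases List.mem_cons.1 hc with h | h; exact absurd h hx; exact h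
        have hlt : x.2 < c' := hgt _ hcr
        rw [List.flatMap_cons, pv_insertBy_append _ _ _ _
            (by intro y hy; have := hB c' (by simp) y hy; simp [this]; omega),
          ih hPrest (fun c h p hp => hB c (by simp [h]) p hp) hcr, List.flatMap_cons]
        simp [hx]

-- insertion into a flatten of strictly-descending buckets, fresh key:
-- x forms a new singleton bucket at the position insertBy gives its count
theorem pv_insert_flat_new (C : List Int) (B : Int → List (Int × Int)) (x : Int × Int)
    (hP : C.Pairwise (fun a b => b < a))
    (hB : ∀ c' ∈ C, ∀ p ∈ B c', p.2 = c')
    (hc : x.2 ∉ C) (hBc : B x.2 = []) :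
    PySem.List.insertBy (fun a b => decide (b.2 < a.2)) x (C.flatMap B)
      = (PySem.List.insertBy (fun a b => decide (b < a)) x.2 C).flatMap
          (fun c' => B c' ++ if x.2 == c' then [x] else []) := by
  induction C with
  | nil => simp [PySem.List.insertBy, hBc]
  | cons c' rest ih =>
      rw [List.pairwise_cons] at hP
      obtain ⟨hgt, hPrest⟩ := hP
      have hne : x.2 ≠ c' := by intro h; exact hc (by simp [h])
      rw [pv_insertBy_cons]
      by_cases hlt : c' < x.2
      · simp only [hlt, decide_true, if_true]
        have hall : ∀ c'' ∈ c' :: rest, (B c'' ++ if x.2 == c'' then [x] else []) = B c'' := by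
          intro c'' hm
          have : x.2 ≠ c'' := by intro h; exact hc (h ▸ hm)
          simp [this]
        rw [List.flatMap_cons, List.flatMap_cons,
          List.flatMap_congr (fun c h => hall c (by simp [h])),
          pv_insertBy_front _ _ _ (by
            intro y hy
            rcases List.mem_append.1 hy with h | h
            · have := hB c' (by simp) y h; simp [this, hlt]
            · rw [List.mem_flatMap] at h
              obtain ⟨c'', hm, hyB⟩ := h
              have h1 := hB c'' (by simp [hm]) y hyB
              have h2 := hgt c'' hm
              simp [h1]; omega)]
        simp [hBc]
      · have hlt2 : x.2 < c' := by omega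
        simp only [hlt, decide_false, if_neg, Bool.false_eq_true, not_false_iff]
        rw [List.flatMap_cons, pv_insertBy_append _ _ _ _
            (by intro y hy; have := hB c' (by simp) y hy; simp [this]; omega),
          ih hPrest (fun c h p hp => hB c (by simp [h]) p hp) (by intro h; exact hc (by simp [h])),
          List.flatMap_cons]
        simp [hne]

-- a sorted list of distinct Ints in descending order is strictly descending
theorem pv_sorted_desc_strict (S : List Int) (hnd : S.Nodup) :
    (PySem.List.sorted S (fun c => c) true).Pairwise (fun a b => b < a) := by
  have h1 := PySem.List.sorted_pairwise_rev S (fun c => c)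
  have h2 : (PySem.List.sorted S (fun c => c) true).Nodup :=
    ((PySem.List.sorted_perm S (fun c => c) true).nodup_iff).2 hnd
  exact (h1.and h2).imp (fun {a b} ⟨hle, hne⟩ => lt_of_le_of_ne hle (fun e => hne e.symm))

-- KEY LEMMA: the stable descending sort by count is the flatten of the count buckets,
-- the distinct counts taken in descending order
theorem pv_sorted_eq_flat_buckets (l : List (Int × Int)) :
    PySem.List.sorted l (fun p => p.2) true
      = (PySem.List.sorted (PySem.Set.ofList (l.map (fun p => p.2))) (fun c => c) true).flatMap
          (fun c => l.filter (fun p => p.2 == c)) := by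
  induction l using List.reverseRecOn with
  | nil =>
      rw [(PySem.List.sorted_eq_nil_iff ([]:List (Int × Int)) (fun p => p.2) true).2 rfl]
      exact (List.flatMap_eq_nil_iff.2 (by simp)).symm
  | append_singleton l x ih =>
      have hfold := PySem.List.sorted_rev_eq_foldl_insertBy (l ++ [x]) (fun p : Int × Int => p.2)
      rw [List.foldl_append] at hfold
      rw [hfold]
      simp only [List.foldl_cons, List.foldl_nil]
      rw [← PySem.List.sorted_rev_eq_foldl_insertBy l (fun p : Int × Int => p.2), ih]
      have hset : PySem.Set.ofList ((l ++ [x]).map (fun p => p.2))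
          = PySem.Set.add (PySem.Set.ofList (l.map (fun p => p.2))) x.2 := by
        rw [PySem.Set.ofList_eq_foldl, PySem.Set.ofList_eq_foldl]
        simp [List.foldl_append]
      set S := PySem.Set.ofList (l.map (fun p => p.2)) with hS
      have hndS : S.Nodup := PySem.Set.nodup_ofList _
      have hP := pv_sorted_desc_strict S hndS
      have hB : ∀ c' ∈ PySem.List.sorted S (fun c => c) true,
          ∀ p ∈ l.filter (fun p => p.2 == c'), p.2 = c' := by
        intro c' _ p hp
        exact beq_iff_eq.1 (List.mem_filter.1 hp).2
      have hfilter : ∀ c', (l ++ [x]).filter (fun p => p.2 == c')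
          = l.filter (fun p => p.2 == c') ++ if x.2 == c' then [x] else [] := by
        intro c'
        rw [List.filter_append]
        congr 1
        by_cases h : x.2 = c' <;> simp [h]
      by_cases hmem : PySem.Set.contains S x.2 = true
      · have hmem' : x.2 ∈ S := (PySem.Set.contains_iff S x.2).1 hmem
        have hC : x.2 ∈ PySem.List.sorted S (fun c => c) true :=
          ((PySem.List.sorted_perm S (fun c => c) true).mem_iff).2 hmem'
        rw [hset, PySem.Set.add, if_pos hmem]
        rw [pv_insert_flat_mem _ _ _ hP hB hC]
        exact List.flatMap_congr (fun c _ => (hfilter c).symm)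
      · have hmem' : x.2 ∉ S := fun h => hmem ((PySem.Set.contains_iff S x.2).2 h)
        have hC : x.2 ∉ PySem.List.sorted S (fun c => c) true :=
          fun h => hmem' (((PySem.List.sorted_perm S (fun c => c) true).mem_iff).1 h)
        have hBc : l.filter (fun p => p.2 == x.2) = [] := by
          rw [List.filter_eq_nil_iff]
          intro p hp hpe
          exact hmem' (hS ▸ (PySem.Set.mem_ofList _ _).2
            (List.mem_map.2 ⟨p, hp, beq_iff_eq.1 hpe⟩))
        rw [hset, PySem.Set.add, if_neg hmem]
        have hsortapp : PySem.List.sorted (S ++ [x.2]) (fun c => c) true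
            = PySem.List.insertBy (fun a b => decide (b < a)) x.2
                (PySem.List.sorted S (fun c => c) true) := by
          have h1 := PySem.List.sorted_rev_eq_foldl_insertBy (S ++ [x.2]) (fun c : Int => c)
          rw [List.foldl_append] at h1
          simp only [List.foldl_cons, List.foldl_nil] at h1
          rw [h1, ← PySem.List.sorted_rev_eq_foldl_insertBy S (fun c : Int => c)]
        rw [hsortapp, pv_insert_flat_new _ _ _ hP hB hC hBc]
        exact List.flatMap_congr (fun c _ => (hfilter c).symm)

-- a fold of the two nested counting loops is a fold over the flattened postings
theorem pv_foldl_flatMap {ν : Type} (xs : List String) (f : String → List Int)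
    (g : ν → Int → ν) (init : ν) :
    (xs.flatMap f).foldl g init = xs.foldl (fun d a => (f a).foldl g d) init := by
  induction xs generalizing init with
  | nil => rfl
  | cons a l ih => simp [List.flatMap_cons, List.foldl_append, ih]

-- A's Counter-update loop produces the counter of the flattened postings, item for item
theorem pv_counts_items_A (occ : List Int) :
    (occ.foldl (fun d rid => d.modify rid 0 (fun v => v + 1))
        (PySem.Dict.empty : PySem.Dict Int Int)).items
      = (PySem.Set.ofList occ).map (fun k => (k, (occ.count k : Int))) := by
  have hkeys : (occ.foldl (fun d rid => d.modify rid 0 (fun v => v + 1))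
      (PySem.Dict.empty : PySem.Dict Int Int)).keys = PySem.Set.ofList occ := by
    have := PySem.Dict.keys_foldl_modify_key occ (fun x => x) 0
      (fun _ _ => (fun v => v + 1)) (PySem.Dict.empty : PySem.Dict Int Int)
    simpa [PySem.Set.update, PySem.Set.ofList_eq_foldl] using this
  have hnd : (occ.foldl (fun d rid => d.modify rid 0 (fun v => v + 1))
      (PySem.Dict.empty : PySem.Dict Int Int)).keys.Nodup := by
    rw [hkeys]; exact PySem.Set.nodup_ofList _
  rw [PySem.Dict.items_eq_map_keys _ hnd 0, hkeys]
  refine List.map_congr_left (fun k _ => ?_)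
  rw [PySem.Dict.getD_foldl_modify_add_one]
  simp [PySem.Dict.empty, PySem.Dict.getD, PySem.Dict.get?]

-- bucket lookup after B's grouping loop: the ids of the pairs carrying count c, in order
theorem pv_buckets_getD (M : List (Int × Int)) (c : Int) :
    (M.foldl (fun d p => d.modify p.2 [] (fun l => l ++ [p.1]))
        (PySem.Dict.empty : PySem.Dict Int (List Int))).getD c []
      = (M.filter (fun p => p.2 == c)).map (fun p => p.1) := by
  have h := PySem.Dict.getD_foldl_modify_append (M.map (fun p => (p.2, p.1)))
      (PySem.Dict.empty : PySem.Dict Int (List Int)) c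
  rw [List.foldl_map] at h
  rw [h, List.filter_map]
  simp [PySem.Dict.empty, PySem.Dict.getD, PySem.Dict.get?, Function.comp_def,
    List.map_map]

-- key set after B's grouping loop: the distinct counts in first-appearance order
theorem pv_buckets_keys (M : List (Int × Int)) :
    (M.foldl (fun d p => d.modify p.2 [] (fun l => l ++ [p.1]))
        (PySem.Dict.empty : PySem.Dict Int (List Int))).keys
      = PySem.Set.ofList (M.map (fun p => p.2)) := by
  have := PySem.Dict.keys_foldl_modify_key M (fun p => p.2) []
    (fun _ p => (fun l => l ++ [p.1])) (PySem.Dict.empty : PySem.Dict Int (List Int))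
  simpa [PySem.Set.update, PySem.Set.ofList_eq_foldl] using this

-- the walk with its early break agrees with the full flatten up to the cutoff
theorem pv_walk_take (b : PySem.Dict Int (List Int)) (n : Int) (cl : List Int) (acc : List Int) :
    (pvWalk b n cl acc).take n.toNat
      = (acc ++ cl.flatMap (fun c => b.getD c [])).take n.toNat := by
  induction cl generalizing acc with
  | nil => simp [pvWalk]
  | cons c rest ih =>
      rw [pvWalk]
      by_cases h : n ≤ (acc.length : Int)
      · rw [if_pos h, (List.take_append_of_le_length (by omega)).symm]
      · rw [if_neg h, ih, List.flatMap_cons, ← List.append_assoc]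

-- ===== VERDICT (by name: the statement is the Claim_ definition above) =====
theorem get_candidate_recipe_ids_spec : Claim_equal_get_candidate_recipe_ids := by
  intro user_set inv_index max_candidates _hdom _hpre
  unfold Spec_get_candidate_recipe_ids get_candidate_recipe_ids get_candidate_recipe_ids_alt
  have hflatA := pv_foldl_flatMap user_set (fun ing => pvGetIngD inv_index ing)
    (fun d rid => d.modify rid 0 (fun v => v + 1)) (PySem.Dict.empty : PySem.Dict Int Int)
  have hflatB := pv_foldl_flatMap user_set (fun ing => pvGetIngD inv_index ing)
    (fun d rid => d.insert rid (d.getD rid 0 + 1)) (PySem.Dict.empty : PySem.Dict Int Int)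
  set occ := user_set.flatMap (fun ing => pvGetIngD inv_index ing) with hocc
  set M := (PySem.Set.ofList occ).map (fun k => (k, (occ.count k : Int))) with hM
  have hitemsA : (user_set.foldl (fun d ing =>
      (pvGetIngD inv_index ing).foldl (fun d rid => d.modify rid 0 (fun v => v + 1)) d)
      (PySem.Dict.empty : PySem.Dict Int Int)).items = M := by
    rw [← hflatA, pv_counts_items_A]
  have hitemsB : (user_set.foldl (fun d ing =>
      (pvGetIngD inv_index ing).foldl (fun d rid => d.insert rid (d.getD rid 0 + 1)) d)
      (PySem.Dict.empty : PySem.Dict Int Int)).items = M := by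
    rw [← hflatB, PySem.Dict.foldl_insert_getD_add_one_eq_counter, PySem.Dict.items_counter]
  simp only [hitemsA, hitemsB]
  by_cases hn : max_candidates ≤ 0
  · rw [if_pos hn]
    unfold pvMostCommon
    rw [if_pos hn]
    by_cases hMe : M.isEmpty <;> simp [hMe, PySem.Set.ofList]
  · rw [if_neg hn]
    set buckets := M.foldl (fun d p => d.modify p.2 [] (fun l => l ++ [p.1]))
      (PySem.Dict.empty : PySem.Dict Int (List Int)) with hbk
    set C := PySem.List.sorted buckets.keys (fun c => c) true with hC
    -- B's returned list, cut at the boundary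
    have hslice : PySem.List.slice (pvWalk buckets max_candidates C []) none (some max_candidates)
        = (pvWalk buckets max_candidates C []).take max_candidates.toNat :=
      PySem.List.slice_to _ (by omega)
    have hwalk := pv_walk_take buckets max_candidates C []
    have hbuckets : ∀ c, buckets.getD c [] = (M.filter (fun p => p.2 == c)).map (fun p => p.1) :=
      fun c => by rw [hbk]; exact pv_buckets_getD M c
    have hkeys : buckets.keys = PySem.Set.ofList (M.map (fun p => p.2)) := by
      rw [hbk]; exact pv_buckets_keys M
    have hres : (pvWalk buckets max_candidates C []).take max_candidates.toNat
        = ((PySem.List.sorted M (fun p => p.2) true).take max_candidates.toNat).map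
            (fun kv => kv.1) := by
      rw [hwalk, List.nil_append, List.flatMap_congr (fun c _ => hbuckets c),
        ← List.map_flatMap, hC, hkeys, ← pv_sorted_eq_flat_buckets, List.map_take]
    by_cases hMe : M.isEmpty
    · have hMnil : M = [] := List.isEmpty_iff.1 hMe
      rw [if_pos hMe, hslice, hres, hMnil]
      simp [(PySem.List.sorted_eq_nil_iff ([] : List (Int × Int)) (fun p => p.2) true).2 rfl]
    · rw [if_neg hMe, hslice, hres]
      unfold pvMostCommon
      rw [if_neg hn]
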